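-- pv_equiv track=rewrite | github.com/invisibleacropolis-ops/RNGEN | tools/fix_wordlist_panel_tscn.py | ensure_unique_name
-- ===== SOURCE A (Python) =====
-- UNIQUE_NODES = {
--     "RefreshButton",
--     "ResourceList",
--     "UseWeights",
--     "DelimiterInput",
--     "SeedInput",
--     "PreviewButton",
--     "PreviewOutput",
--     "ValidationLabel",
--     "MetadataSummary",
--     "NotesLabel",
-- }
--
-- def ensure_unique_name(lines: list[str]) -> list[str]:
--     result: list[str] = []
--     total = len(lines)
--     index = 0
--     while index < total:
--         line = lines[index]
--         result.append(line)
--         if line.startswith("[node ") and "name=\"" in line: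
--             name = line.split("name=\"")[1].split("\"")[0]
--             if name in UNIQUE_NODES:
--                 has_flag = False
--                 lookahead = index + 1
--                 while lookahead < total:
--                     next_line = lines[lookahead]
--                     if next_line.startswith("["):
--                         break
--                     if "unique_name_in_owner" in next_line:
--                         has_flag = True
--                         break
--                     if next_line.strip() == "":
--                         # stop before blank separator
--                         break
--                     lookahead += 1
--                 if not has_flag:
--                     result.append("unique_name_in_owner = true")
--         index += 1
--     return result
-- ===== SOURCE B (Python) =====
-- UNIQUE_NODES = {
--     "RefreshButton",
--     "ResourceList",
--     "UseWeights",
--     "DelimiterInput",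
--     "SeedInput",
--     "PreviewButton",
--     "PreviewOutput",
--     "ValidationLabel",
--     "MetadataSummary",
--     "NotesLabel",
-- }
--
-- FLAG_LINE = "unique_name_in_owner = true"
--
--
-- def _opens_scan(line: str) -> bool:
--     if line.startswith("[node ") and "name=\"" in line:
--         name = line.split("name=\"")[1].split("\"")[0]
--         return name in UNIQUE_NODES
--     return False
--
--
-- def ensure_unique_name(lines: list[str]) -> list[str]:
--     out: list[str] = []
--     buf = None  # None = not scanning; else list of buffered property lines
--     i = 0
--     n = len(lines)
--     while i < n:
--         line = lines[i]
--         if buf is not None: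
--             if line.startswith("["):
--                 # node ended without the flag: insert it before the buffered lines,
--                 # then fall through to process this line normally
--                 out.append(FLAG_LINE)
--                 out.extend(buf)
--                 buf = None
--             elif "unique_name_in_owner" in line:
--                 out.extend(buf)
--                 out.append(line)
--                 buf = None
--                 i += 1
--                 continue
--             elif line.strip() == "":
--                 out.append(FLAG_LINE)
--                 out.extend(buf)
--                 out.append(line)
--                 buf = None
--                 i += 1
--                 continue
--             else:
--                 buf.append(line)
--                 i += 1
--                 continue
--         out.append(line)
--         if _opens_scan(line):
--             buf = []
--         i += 1
--     if buf is not None: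
--         out.append(FLAG_LINE)
--         out.extend(buf)
--     return out
-- ===== Notes on version B (the rewrite author's own statement) =====
-- stated objective: alternative
-- what changed: Replaced A's nested index-based lookahead (re-scanning the lines after each unique node header) by a single forward pass with an explicit scanning state: property lines after a unique header are buffered and flushed with the flag prepended when the node ends, so each line is visited once.
import Mathlib
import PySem

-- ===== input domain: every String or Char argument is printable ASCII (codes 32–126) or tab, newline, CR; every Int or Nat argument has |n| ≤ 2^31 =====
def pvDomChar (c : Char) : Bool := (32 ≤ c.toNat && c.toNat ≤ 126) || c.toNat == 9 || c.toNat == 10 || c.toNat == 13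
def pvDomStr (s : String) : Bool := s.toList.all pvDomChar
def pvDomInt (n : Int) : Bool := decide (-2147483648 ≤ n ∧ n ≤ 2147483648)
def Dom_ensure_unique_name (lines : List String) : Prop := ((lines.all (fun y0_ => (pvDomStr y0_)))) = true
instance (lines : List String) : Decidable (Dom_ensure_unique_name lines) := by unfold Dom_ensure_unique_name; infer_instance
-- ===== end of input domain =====

-- B replaces A's nested index lookahead by a single forward pass with an explicit
-- scanning buffer (objective: alternative decomposition; same asymptotic cost).

-- ===== PORT A =====
def pvUniqueNodes : List String :=
  ["RefreshButton", "ResourceList", "UseWeights", "DelimiterInput", "SeedInput",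
   "PreviewButton", "PreviewOutput", "ValidationLabel", "MetadataSummary", "NotesLabel"]

def pvFlagLine : String := "unique_name_in_owner = true"

-- name = line.split("name=\"")[1].split("\"")[0]  (the [1] is guarded by the 'in' test; default unreachable)
def pvNameA (line : String) : String :=
  ((PySem.Str.split? (((PySem.Str.split? line "name=\"").getD []).getD 1 "") "\"").getD []).getD 0 ""

-- the inner 'while lookahead < total' scan of A, over the suffix after the header
def pvLookA : List String → Bool
  | [] => false
  | next :: t =>
    if PySem.Str.startswith next "[" then false
    else if PySem.Str.isIn "unique_name_in_owner" next then true
    else if PySem.Str.strip next == "" then false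
    else pvLookA t

-- the outer 'while index < total' loop of A, building result front-to-back
def pvLoopA : List String → List String
  | [] => []
  | line :: rest =>
    if PySem.Str.startswith line "[node " && PySem.Str.isIn "name=\"" line then
      if pvUniqueNodes.contains (pvNameA line) then
        if pvLookA rest then line :: pvLoopA rest
        else line :: pvFlagLine :: pvLoopA rest
      else line :: pvLoopA rest
    else line :: pvLoopA rest

def ensure_unique_name (lines : List String) : List String := pvLoopA lines

-- ===== PORT B =====
def pvOpensB (line : String) : Bool :=
  if PySem.Str.startswith line "[node " && PySem.Str.isIn "name=\"" line then
    pvUniqueNodes.contains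
      (((PySem.Str.split? (((PySem.Str.split? line "name=\"").getD []).getD 1 "") "\"").getD []).getD 0 "")
  else false

-- Source B's single while loop: state = optional buffer of pending property lines
def pvLoopB (buf : Option (List String)) : List String → List String
  | [] => match buf with
    | none => []
    | some b => pvFlagLine :: b
  | line :: rest =>
    match buf with
    | some b =>
      if PySem.Str.startswith line "[" then
        -- flush with the flag, then process this line normally (fall-through)
        pvFlagLine :: (b ++ pvLoopB none (line :: rest))
      else if PySem.Str.isIn "unique_name_in_owner" line then
        b ++ line :: pvLoopB none rest
      else if PySem.Str.strip line == "" then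
        pvFlagLine :: (b ++ line :: pvLoopB none rest)
      else
        pvLoopB (some (b ++ [line])) rest
    | none =>
      line :: pvLoopB (if pvOpensB line then some [] else none) rest
termination_by ls => (ls.length, if buf.isSome then 1 else 0)
decreasing_by
  · simp [Prod.lex_iff]
  · simp [Prod.lex_iff]
  · simp [Prod.lex_iff]
  · simp [Prod.lex_iff]
  · simp [Prod.lex_iff]

def ensure_unique_name_alt (lines : List String) : List String := pvLoopB none lines

-- ===== PRECONDITION & SPEC =====
def Spec_ensure_unique_name (lines : List String) (out : List String) : Prop := out = ensure_unique_name_alt lines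
instance (lines : List String) (out : List String) : Decidable (Spec_ensure_unique_name lines out) := by unfold Spec_ensure_unique_name; infer_instance

-- ===== CLAIM (what is proved, stated in full; the proofs are below) =====
def Claim_equal_ensure_unique_name : Prop := ∀ (lines : List String), Dom_ensure_unique_name lines → Spec_ensure_unique_name lines (ensure_unique_name lines)

-- ===== LEMMAS AND PROOFS =====

lemma startswith_node_bracket (line : String) :
    PySem.Str.startswith line "[node " = true → PySem.Str.startswith line "[" = true := by
  intro h
  rw [PySem.Str.startswith_eq, PySem.Chars.startswith_iff] at h ⊢
  exact List.IsPrefix.trans ⟨"node ".toList, by decide⟩ h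

lemma startswith_node_false (line : String)
    (h : PySem.Str.startswith line "[" = false) :
    PySem.Str.startswith line "[node " = false := by
  cases hx : PySem.Str.startswith line "[node " with
  | false => rfl
  | true => exact absurd h (by rw [startswith_node_bracket line hx]; simp)

lemma pvOpensB_eq (line : String) :
    pvOpensB line = ((PySem.Str.startswith line "[node " && PySem.Str.isIn "name=\"" line)
      && pvUniqueNodes.contains (pvNameA line)) := by
  unfold pvOpensB pvNameA
  split <;> simp_all

lemma pvLoop_key (ls : List String) :
    pvLoopB none ls = pvLoopA ls ∧
      ∀ b, pvLoopB (some b) ls =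
        (if pvLookA ls then [] else [pvFlagLine]) ++ b ++ pvLoopA ls := by
  induction ls with
  | nil =>
    exact ⟨by simp [pvLoopB, pvLoopA], fun b => by simp [pvLoopB, pvLookA, pvLoopA]⟩
  | cons line rest ih =>
    obtain ⟨ih1, ih2⟩ := ih
    have hnone : pvLoopB none (line :: rest) = pvLoopA (line :: rest) := by
      rw [pvLoopB, pvOpensB_eq, pvLoopA]
      cases hsw : PySem.Str.startswith line "[node " <;>
        cases hnm : PySem.Str.isIn "name=\"" line <;>
          by_cases h2 : pvNameA line ∈ pvUniqueNodes <;>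
            by_cases hl : pvLookA rest = true <;>
              simp_all
    refine ⟨hnone, fun b => ?_⟩
    rw [pvLoopB]
    cases hbr : PySem.Str.startswith line "[" with
    | true =>
      have hlk : pvLookA (line :: rest) = false := by rw [pvLookA]; simp_all
      simp_all [List.append_assoc]
    | false =>
      have hnn : PySem.Str.startswith line "[node " = false := startswith_node_false line hbr
      have hA : pvLoopA (line :: rest) = line :: pvLoopA rest := by rw [pvLoopA]; simp_all
      cases hin : PySem.Str.isIn "unique_name_in_owner" line with
      | true =>
        have hlk : pvLookA (line :: rest) = true := by rw [pvLookA]; simp_all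
        simp_all
      | false =>
        by_cases hst : PySem.Str.strip line = ""
        · have hlk : pvLookA (line :: rest) = false := by rw [pvLookA]; simp_all
          simp_all [List.append_assoc]
        · have hlk : pvLookA (line :: rest) = pvLookA rest := by rw [pvLookA]; simp_all
          simp_all [List.append_assoc]

-- ===== VERDICT (by name: the statement is the Claim_ definition above) =====
theorem ensure_unique_name_spec : Claim_equal_ensure_unique_name := by
  intro lines _
  unfold Spec_ensure_unique_name ensure_unique_name ensure_unique_name_alt
  exact ((pvLoop_key lines).1).symm
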